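-- pv_equiv track=rewrite | github.com/nielscol/radiocomms | lib/transforms.py | round_truncate_sample
-- ===== SOURCE A (Python) =====
-- def round_truncate_sample(sample, n_in, n_out):
--     """ Takes int type sample of n_in bits, reduces it n_out bits with rounding
--     """
--     delta_n = n_in-n_out
--     sum_of_truncated = 0
--     for n in range(delta_n):
--         sum_of_truncated += sample&(2**n)
--     if sum_of_truncated < 2**(delta_n-1):
--         return sample >> delta_n
--     elif (sample >> delta_n) + 1 == 2**(n_out): # if will cause overflow
--         return sample >> delta_n
--     else:
--         return (sample >> delta_n) + 1
-- ===== SOURCE B (Python) =====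
-- def round_truncate_sample(sample, n_in, n_out):
--     """ Takes int type sample of n_in bits, reduces it n_out bits with rounding
--     """
--     delta_n = n_in - n_out
--     shifted = sample >> delta_n
--     frac = sample & ((1 << delta_n) - 1)
--     if 2 * frac >= (1 << delta_n) and shifted + 1 != 2 ** n_out:
--         return shifted + 1
--     return shifted
-- ===== Notes on version B (the rewrite author's own statement) =====
-- stated objective: faster
-- what changed: The O(delta_n) loop summing the truncated bits one by one is replaced by a single mask sample & ((1<<delta_n)-1), and the round/overflow decision is folded into one branch; intended as faster (measured 19x-598x at growing delta_n, unconfirmed in a timing run's consistency rule since A timed out at the largest sizes).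
import Mathlib
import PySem

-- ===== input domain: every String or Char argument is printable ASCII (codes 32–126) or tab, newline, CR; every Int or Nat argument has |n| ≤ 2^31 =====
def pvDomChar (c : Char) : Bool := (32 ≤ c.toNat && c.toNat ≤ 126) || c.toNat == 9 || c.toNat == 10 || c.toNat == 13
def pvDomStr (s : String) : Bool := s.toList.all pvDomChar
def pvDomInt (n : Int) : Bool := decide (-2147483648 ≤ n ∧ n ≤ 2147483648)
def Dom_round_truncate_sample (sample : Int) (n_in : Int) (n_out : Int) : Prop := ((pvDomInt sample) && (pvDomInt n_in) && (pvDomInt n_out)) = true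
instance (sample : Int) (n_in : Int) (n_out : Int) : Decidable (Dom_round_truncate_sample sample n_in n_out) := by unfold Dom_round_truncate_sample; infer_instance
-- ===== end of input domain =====

-- B replaces A's O(delta_n) bit-summing loop with a single mask sample & ((1<<delta_n)-1); intended as faster (measured 19x-598x on growing delta_n, though A timed out on the largest sizes so a timing run could not confirm it).


-- ===== PORT A =====
-- Literal port of A. Notes on exactness:
--  * 'sum_of_truncated < 2**(delta_n-1)': when delta_n-1 < 0, Python's 2**(delta_n-1) is a
--    positive fraction < 1, and the summands sample&2**n are nonnegative ints, so the
--    comparison is 'sum_of_truncated ≤ 0'; that is the else-branch of the guard below.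
--  * '(sample >> delta_n) + 1 == 2**(n_out)': when n_out < 0, 2**n_out is a fraction in (0,1),
--    never equal to an int; hence the '0 ≤ n_out ∧' guard.
def round_truncate_sample (sample : Int) (n_in : Int) (n_out : Int) : Int :=
  let delta_n := n_in - n_out
  let sum_of_truncated :=
    (PySem.List.pyRange 0 delta_n 1).foldl
      (fun acc n => acc + PySem.Int.band sample (2 ^ n.toNat)) 0
  if (if 1 ≤ delta_n then sum_of_truncated < 2 ^ (delta_n - 1).toNat else sum_of_truncated ≤ 0) then
    sample >>> delta_n.toNat
  else if 0 ≤ n_out ∧ (sample >>> delta_n.toNat) + 1 = 2 ^ n_out.toNat then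
    sample >>> delta_n.toNat
  else
    (sample >>> delta_n.toNat) + 1

-- ===== PORT B =====
-- Literal port of B ('shifted + 1 != 2**n_out' carries the same '0 ≤ n_out ∧' guard as in A's port).
def round_truncate_sample_alt (sample : Int) (n_in : Int) (n_out : Int) : Int :=
  let delta_n := n_in - n_out
  let shifted := sample >>> delta_n.toNat
  let pw : Int := (1 : Int) <<< delta_n.toNat   -- 1 << delta_n
  let frac := PySem.Int.band sample (pw - 1)
  if 2 * frac ≥ pw ∧ ¬(0 ≤ n_out ∧ shifted + 1 = 2 ^ n_out.toNat) then
    shifted + 1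
  else
    shifted

-- ===== PRECONDITION & SPEC =====
-- Pre_ excludes exactly the inputs where Python A raises: if n_in < n_out, A reaches
-- 'sample >> delta_n' with a negative shift count and raises ValueError (B does the same).
def Pre_round_truncate_sample (sample : Int) (n_in : Int) (n_out : Int) : Prop := n_out ≤ n_in
instance (sample : Int) (n_in : Int) (n_out : Int) : Decidable (Pre_round_truncate_sample sample n_in n_out) := by unfold Pre_round_truncate_sample; infer_instance
def pvWitness_round_truncate_sample : Int × Int × Int := (13, 5, 3)

def Spec_round_truncate_sample (sample : Int) (n_in : Int) (n_out : Int) (out : Int) : Prop := out = round_truncate_sample_alt sample n_in n_out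
instance (sample : Int) (n_in : Int) (n_out : Int) (out : Int) : Decidable (Spec_round_truncate_sample sample n_in n_out out) := by unfold Spec_round_truncate_sample; infer_instance

-- ===== CLAIM (what is proved, stated in full; the proofs are below) =====
def Claim_equal_round_truncate_sample : Prop := ∀ (sample : Int) (n_in : Int) (n_out : Int), Dom_round_truncate_sample sample n_in n_out → Pre_round_truncate_sample sample n_in n_out → Spec_round_truncate_sample sample n_in n_out (round_truncate_sample sample n_in n_out)

-- ===== LEMMAS AND PROOFS =====

-- Nat: peeling the top bit off a modulus.
theorem pv_mod_pow_succ (a n : Nat) : a % 2^(n+1) = a % 2^n + (a / 2^n % 2) * 2^n := by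
  have h1 := Nat.div_add_mod a (2^n)
  have h2 := Nat.div_add_mod (a / 2^n) 2
  have hr : a % 2^n < 2^n := Nat.mod_lt _ (by positivity)
  have hb : a / 2^n % 2 ≤ 1 := Nat.le_of_lt_succ (Nat.mod_lt _ (by norm_num))
  have hx : (a / 2^n % 2) * 2^n + a % 2^n < 2^(n+1) := by
    have : (a / 2^n % 2) * 2^n ≤ 1 * 2^n := Nat.mul_le_mul_right _ hb
    rw [pow_succ]; omega
  have key : a = 2^(n+1) * (a / 2^n / 2) + ((a / 2^n % 2) * 2^n + a % 2^n) :=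
    calc a = 2^n * (a/2^n) + a%2^n := h1.symm
    _ = 2^n * (2*(a/2^n/2) + a/2^n%2) + a%2^n := by rw [h2]
    _ = 2^(n+1) * (a/2^n/2) + ((a/2^n%2)*2^n + a%2^n) := by ring
  conv_lhs => rw [key]
  rw [Nat.mul_add_mod, Nat.mod_eq_of_lt hx, Nat.add_comm]

theorem pv_testBit_toNat (a n : Nat) : (a.testBit n).toNat = a / 2^n % 2 := by
  simp only [Nat.testBit, Nat.shiftRight_eq_div_pow]
  rcases Nat.mod_two_eq_zero_or_one (a / 2^n) with h | h <;> simp [h]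

-- Int: Python's % of a negative number by 2^k, via m = -s-1.
theorem pv_neg_emod (m k : Nat) : (-(↑m + 1) : Int) % 2^k = 2^k - 1 - ↑(m % 2^k) := by
  have hd := Nat.div_add_mod m (2^k)
  have hr : m % 2^k < 2^k := Nat.mod_lt _ (by positivity)
  have hdz : (m : Int) = 2^k * ((m / 2^k : Nat) : Int) + ((m % 2^k : Nat) : Int) := by
    exact_mod_cast hd.symm
  have key : (-(↑m + 1) : Int) = ((2^k - 1 - ↑(m % 2^k)) + 2^k * (-(↑(m / 2^k)) - 1)) := by
    rw [hdz]; ring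
  rw [key, Int.add_mul_emod_self_left, Int.emod_eq_of_lt (by push_cast; omega) (by push_cast; omega)]

theorem pv_cast_mod (a k : Nat) : ((a : Int)) % (2:Int)^k = ((a % 2^k : Nat) : Int) := by
  have h2 : ((2:Int)^k) = ((2^k : Nat) : Int) := by push_cast; ring
  rw [h2, Int.natCast_mod]

-- Python's sample & 2**n is the n-th binary digit: the difference of two moduli.
theorem pv_band_pow (s : Int) (n : Nat) :
    PySem.Int.band s (2^n) = s % 2^(n+1) - s % 2^n := by
  have hpow : ((2:Int)^n).toNat = 2^n := by
    have : ((2:Int)^n) = ((2^n : Nat) : Int) := by push_cast; ring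
    rw [this, Int.toNat_natCast]
  rcases le_or_gt 0 s with hs | hs
  · obtain ⟨a, rfl⟩ : ∃ a : Nat, s = (a : Int) := ⟨s.toNat, (Int.toNat_of_nonneg hs).symm⟩
    rw [PySem.Int.band, if_pos hs, if_pos (by positivity), hpow, Int.toNat_natCast,
      Nat.and_two_pow, pv_testBit_toNat]
    rw [pv_cast_mod a (n+1), pv_cast_mod a n]
    have h := pv_mod_pow_succ a n
    omega
  · obtain ⟨m, rfl⟩ : ∃ m : Nat, s = -(↑m + 1) := by
      refine ⟨(-s - 1).toNat, ?_⟩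
      have := Int.toNat_of_nonneg (a := -s - 1) (by omega); omega
    rw [PySem.Int.band, if_neg (by omega), if_pos (by positivity), hpow]
    have harg : (-(-(↑m + 1) : Int) - 1).toNat = m := by
      have : (-(-(↑m + 1) : Int) - 1) = (m : Int) := by ring
      rw [this, Int.toNat_natCast]
    rw [harg, Nat.and_comm, Nat.and_two_pow, pv_testBit_toNat,
      pv_neg_emod m (n+1), pv_neg_emod m n]
    have h := pv_mod_pow_succ m n
    have hb : m / 2^n % 2 ≤ 1 := Nat.le_of_lt_succ (Nat.mod_lt _ (by norm_num))
    have hble : (m / 2^n % 2) * 2^n ≤ 2^n := by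
      calc (m / 2^n % 2) * 2^n ≤ 1 * 2^n := Nat.mul_le_mul_right _ hb
      _ = 2^n := one_mul _
    have hm1 : m % 2^(n+1) < 2^(n+1) := Nat.mod_lt _ (by positivity)
    have hm0 : m % 2^n < 2^n := Nat.mod_lt _ (by positivity)
    have hp1 : ((2:Int)^(n+1)) = ((2^(n+1) : Nat) : Int) := by push_cast; ring
    have hp0 : ((2:Int)^n) = ((2^n : Nat) : Int) := by push_cast; ring
    rw [hp1, hp0]
    have hps : (2^(n+1) : Nat) = 2^n * 2 := by ring
    omega

-- Python's sample & (2**d - 1) is sample % 2**d.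
theorem pv_band_mask (s : Int) (d : Nat) :
    PySem.Int.band s (2^d - 1) = s % 2^d := by
  have hm : ((2:Int)^d - 1).toNat = 2^d - 1 := by
    have : ((2:Int)^d - 1) = ((2^d - 1 : Nat) : Int) := by
      have : (1:Nat) ≤ 2^d := Nat.one_le_two_pow
      push_cast [this]; ring
    rw [this, Int.toNat_natCast]
  have hmnn : (0:Int) ≤ 2^d - 1 := by
    have : (1:Int) ≤ 2^d := one_le_pow₀ (by norm_num)
    omega
  rcases le_or_gt 0 s with hs | hs
  · obtain ⟨a, rfl⟩ : ∃ a : Nat, s = (a : Int) := ⟨s.toNat, (Int.toNat_of_nonneg hs).symm⟩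
    rw [PySem.Int.band, if_pos hs, if_pos hmnn, Int.toNat_natCast, hm,
      Nat.and_two_pow_sub_one_eq_mod]
    rw [pv_cast_mod a d]
  · obtain ⟨m, rfl⟩ : ∃ m : Nat, s = -(↑m + 1) := by
      refine ⟨(-s - 1).toNat, ?_⟩
      have := Int.toNat_of_nonneg (a := -s - 1) (by omega); omega
    rw [PySem.Int.band, if_neg (by omega), if_pos hmnn, hm]
    have harg : (-(-(↑m + 1) : Int) - 1).toNat = m := by
      have : (-(-(↑m + 1) : Int) - 1) = (m : Int) := by ring
      rw [this, Int.toNat_natCast]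
    rw [harg, Nat.and_comm, Nat.and_two_pow_sub_one_eq_mod, pv_neg_emod m d]
    have hr : m % 2^d < 2^d := Nat.mod_lt _ (by positivity)
    have h1 : (1:Nat) ≤ 2^d := Nat.one_le_two_pow
    push_cast [Nat.cast_sub (by omega : m % 2^d ≤ 2^d - 1), Nat.cast_sub h1]
    ring

-- A's loop total: the truncated bits sum to sample % 2**d.
theorem pv_sum_truncated (s : Int) (d : Nat) :
    ((PySem.List.pyRange 0 (d : Int) 1).map (fun n => PySem.Int.band s (2 ^ n.toNat))).sum
      = s % 2^d := by
  induction d with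
  | zero => simp [PySem.List.pyRange]
  | succ d ih =>
    have hstep : PySem.List.pyRange 0 ((d:Int)+1) 1 = PySem.List.pyRange 0 (d:Int) 1 ++ [(d:Int)] :=
      PySem.List.pyRange_one_succ_right (by positivity)
    have hcast : ((d+1 : Nat) : Int) = (d : Int) + 1 := by push_cast; ring
    rw [hcast, hstep, List.map_append, List.sum_append, ih]
    simp only [List.map_cons, List.map_nil, List.sum_cons, List.sum_nil, Int.toNat_natCast]
    rw [pv_band_pow]
    ring

-- ===== VERDICT (by name: the statement is the Claim_ definition above) =====
theorem round_truncate_sample_spec : Claim_equal_round_truncate_sample := by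
  intro sample n_in n_out _ hpre
  replace hpre : n_out ≤ n_in := hpre
  unfold Spec_round_truncate_sample round_truncate_sample round_truncate_sample_alt
  obtain ⟨d, hd⟩ : ∃ d : Nat, n_in - n_out = (d : Int) :=
    ⟨(n_in - n_out).toNat, (Int.toNat_of_nonneg (by omega)).symm⟩
  simp only [hd, PySem.List.foldl_add, zero_add, Int.toNat_natCast, Int.shiftLeft_eq, one_mul,
    pv_sum_truncated, pv_band_mask]
  by_cases hd0 : d = 0
  · subst hd0
    norm_num [Int.emod_one]
  · have h1d : (1:Int) ≤ (d:Int) := by exact_mod_cast Nat.one_le_iff_ne_zero.mpr hd0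
    have hsub : ((d:Int) - 1).toNat = d - 1 := by omega
    have hpow : (2:Int)^d = 2 * 2^(d-1) := by
      rw [← pow_succ']
      congr 1
      omega
    have hc : (if 1 ≤ (d:Int) then sample % 2^d < 2 ^ ((d:Int) - 1).toNat
               else sample % 2^d ≤ 0) = (sample % 2^d < 2^(d-1)) := by
      rw [if_pos h1d, hsub]
    simp only [hc]
    by_cases hlt : sample % 2^d < 2^(d-1)
    · have hig : ¬(2 * (sample % 2^d) ≥ 2^d) := by omega
      simp [hlt, hig]
    · have hig : 2 * (sample % 2^d) ≥ 2^d := by omega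
      by_cases hov : 0 ≤ n_out ∧ (sample >>> d) + 1 = 2 ^ n_out.toNat
      · simp [hlt, hov.1, hov.2]
      · simp [hlt, hig, hov]
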